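-- pv_equiv track=rewrite | github.com/6210qwe/leetcode_py | leetcode_solutions/by_id/q3588.py | count_winning_sequences
-- ===== SOURCE A (Python) =====
-- MOD = 10**9 + 7
--
-- def count_winning_sequences(s: str) -> int:
--     n = len(s)
--     if n == 1:
--         return 0
--
--     # 定义 dp 数组
--     dp = [[0] * 3 for _ in range(n)]
--     win_map = {'F': 0, 'W': 1, 'E': 2}
--     lose_map = {0: [2], 1: [0], 2: [1]}
--
--     # 初始化第一个回合
--     for j in range(3):
--         if j != win_map[s[0]]:
--             dp[0][j] = 1
--
--     # 动态规划更新 dp 数组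
--     for i in range(1, n):
--         for j in range(3):
--             if j != win_map[s[i]]:
--                 for k in range(3):
--                     if k != j:
--                         dp[i][j] = (dp[i][j] + dp[i - 1][k]) % MOD
--
--     # 计算最终结果
--     result = sum(dp[n - 1]) % MOD
--     return result
-- ===== SOURCE B (Python) =====
-- MOD = 10**9 + 7
--
-- def count_winning_sequences(s: str) -> int:
--     n = len(s)
--     if n == 1:
--         return 0
--     win = {'F': 0, 'W': 1, 'E': 2}
--     w0 = win[s[0]]
--     # Transfer-matrix method: each round after the first contributes a 3x3 0/1
--     # matrix M with M[k][j] = 1 iff move j is legal after move k (j != win[c], j != k);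
--     # the answer is the row vector for round 0 times the product of these matrices.
--     P = [[1 if i == j else 0 for j in range(3)] for i in range(3)]
--     for c in s[1:]:
--         w = win[c]
--         M = [[0 if (j == w or j == k) else 1 for j in range(3)] for k in range(3)]
--         P = [[sum(P[i][k] * M[k][j] for k in range(3)) % MOD for j in range(3)] for i in range(3)]
--     return sum(P[k][j] for k in range(3) if k != w0 for j in range(3)) % MOD
-- ===== Notes on version B (the rewrite author's own statement) =====
-- stated objective: alternative
-- what changed: Replaces A's n x 3 DP table with triple-nested index loops by the transfer-matrix method: each round is encoded as a 3x3 0/1 legality matrix and the answer is the initial row vector applied to the fold (product) of these matrices.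
import Mathlib
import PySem

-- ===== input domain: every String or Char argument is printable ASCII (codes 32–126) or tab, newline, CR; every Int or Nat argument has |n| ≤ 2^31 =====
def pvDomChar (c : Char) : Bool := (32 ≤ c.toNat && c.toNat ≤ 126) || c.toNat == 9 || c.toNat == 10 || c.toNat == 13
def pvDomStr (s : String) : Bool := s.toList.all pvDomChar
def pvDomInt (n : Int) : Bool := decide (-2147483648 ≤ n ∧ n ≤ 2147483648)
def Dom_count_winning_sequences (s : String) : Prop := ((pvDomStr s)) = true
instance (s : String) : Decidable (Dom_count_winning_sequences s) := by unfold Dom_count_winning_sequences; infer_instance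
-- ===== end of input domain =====

-- B replaces A's n×3 DP table and its three nested index loops by the transfer-matrix
-- method: a 3×3 legality matrix per round, folded by matrix product (objective: alternative).

-- ===== PORT A =====
-- win_map = {'F':0,'W':1,'E':2}: dict lookup; a missing key is KeyError, excluded by Pre_
def cwsWinA (c : Char) : Int :=
  if c = 'F' then 0 else if c = 'W' then 1 else if c = 'E' then 2 else -1

def count_winning_sequences (s : String) : Int :=
  let cs := s.toList
  let n : Int := cs.length
  if n = 1 then 0 else
    -- dp = [[0]*3 for _ in range(n)]
    let dp : List (List Int) := List.replicate cs.length [0, 0, 0]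
    -- for j in range(3): if j != win_map[s[0]]: dp[0][j] = 1
    let dp := (PySem.List.pyRange 0 3 1).foldl (fun dp j =>
      if j ≠ cwsWinA ((PySem.List.pyGet? cs 0).getD ' ') then
        dp.set 0 ((dp.getD 0 []).set j.toNat 1)
      else dp) dp
    -- for i in range(1, n): for j in range(3): if j != win_map[s[i]]: for k in range(3): if k != j: …
    let dp := (PySem.List.pyRange 1 n 1).foldl (fun dp i =>
      (PySem.List.pyRange 0 3 1).foldl (fun dp j =>
        if j ≠ cwsWinA ((PySem.List.pyGet? cs i).getD ' ') then
          (PySem.List.pyRange 0 3 1).foldl (fun dp k =>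
            if k ≠ j then
              dp.set i.toNat ((dp.getD i.toNat []).set j.toNat
                (PySem.Int.mod ((dp.getD i.toNat []).getD j.toNat 0
                  + (dp.getD (i - 1).toNat []).getD k.toNat 0) 1000000007))
            else dp) dp
        else dp) dp) dp
    -- result = sum(dp[n-1]) % MOD
    PySem.Int.mod ((dp.getD (n - 1).toNat []).foldl (· + ·) 0) 1000000007

-- ===== PORT B =====
-- win = {'F':0,'W':1,'E':2}: dict lookup; a missing key is KeyError, excluded by Pre_
def cwsWinB (c : Char) : Int :=
  if c = 'F' then 0 else if c = 'W' then 1 else if c = 'E' then 2 else -1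

-- the loop body of B: build the round's 3×3 legality matrix M and multiply P by it (mod MOD)
def cwsMatStep (P : List (List Int)) (c : Char) : List (List Int) :=
  let w := cwsWinB c
  let M : List (List Int) := (PySem.List.pyRange 0 3 1).map (fun k =>
    (PySem.List.pyRange 0 3 1).map (fun j => if j = w ∨ j = k then 0 else 1))
  (PySem.List.pyRange 0 3 1).map (fun i => (PySem.List.pyRange 0 3 1).map (fun j =>
    PySem.Int.mod (((PySem.List.pyRange 0 3 1).map (fun k =>
      (P.getD i.toNat []).getD k.toNat 0 * (M.getD k.toNat []).getD j.toNat 0)).foldl (· + ·) 0)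
      1000000007))

def count_winning_sequences_alt (s : String) : Int :=
  let cs := s.toList
  if (cs.length : Int) = 1 then 0 else
    let w0 := cwsWinB ((PySem.List.pyGet? cs 0).getD ' ')
    -- P = [[1 if i == j else 0 for j in range(3)] for i in range(3)]
    let P : List (List Int) := (PySem.List.pyRange 0 3 1).map (fun i =>
      (PySem.List.pyRange 0 3 1).map (fun j => if i = j then 1 else 0))
    -- for c in s[1:]: P = P · M(c)  (mod MOD)
    let P := (cs.drop 1).foldl cwsMatStep P
    -- sum(P[k][j] for k in range(3) if k != w0 for j in range(3)) % MOD
    PySem.Int.mod ((PySem.List.pyRange 0 3 1).foldl (fun acc k =>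
      if k ≠ w0 then
        (PySem.List.pyRange 0 3 1).foldl (fun acc j =>
          acc + (P.getD k.toNat []).getD j.toNat 0) acc
      else acc) 0) 1000000007

-- ===== PRECONDITION & SPEC =====
-- Pre_ excludes exactly the inputs where A raises (and B raises identically): the empty
-- string (IndexError on s[0]) and strings of length at least 2 containing a character
-- that is not one of the three win_map keys (KeyError).
def Pre_count_winning_sequences (s : String) : Prop :=
  s.toList ≠ [] ∧
    (s.toList.length = 1 ∨ (s.toList.all fun c => c == 'F' || c == 'W' || c == 'E') = true)
instance (s : String) : Decidable (Pre_count_winning_sequences s) := by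
  unfold Pre_count_winning_sequences; infer_instance
def pvWitness_count_winning_sequences : String := "FWE"

def Spec_count_winning_sequences (s : String) (out : Int) : Prop := out = count_winning_sequences_alt s
instance (s : String) (out : Int) : Decidable (Spec_count_winning_sequences s out) := by unfold Spec_count_winning_sequences; infer_instance

-- ===== CLAIM (what is proved, stated in full; the proofs are below) =====
def Claim_equal_count_winning_sequences : Prop := ∀ (s : String), Dom_count_winning_sequences s → Pre_count_winning_sequences s → Spec_count_winning_sequences s (count_winning_sequences s)

-- ===== LEMMAS AND PROOFS =====

-- the per-round transition, written exactly as A's inner k-loop accumulates it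
def cwsStepT (t : Int × Int × Int) (w : Int) : Int × Int × Int :=
  (if (0 : Int) = w then 0 else
     PySem.Int.mod (PySem.Int.mod (0 + t.2.1) 1000000007 + t.2.2) 1000000007,
   if (1 : Int) = w then 0 else
     PySem.Int.mod (PySem.Int.mod (0 + t.1) 1000000007 + t.2.2) 1000000007,
   if (2 : Int) = w then 0 else
     PySem.Int.mod (PySem.Int.mod (0 + t.1) 1000000007 + t.2.1) 1000000007)

def cwsTri (t : Int × Int × Int) : List Int := [t.1, t.2.1, t.2.2]

def cwsRun (t : Int × Int × Int) (l : List Char) : Int × Int × Int :=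
  l.foldl (fun t ch => cwsStepT t (cwsWinA ch)) t

-- the table A builds: processed rows, then the current row, recursing on the remaining chars
def cwsRows (d0 : List (List Int)) (t : Int × Int × Int) (l : List Char) : List (List Int) :=
  match l with
  | [] => d0 ++ [cwsTri t]
  | ch :: l' => cwsRows (d0 ++ [cwsTri t]) (cwsStepT t (cwsWinA ch)) l'

lemma cws_getD_at (d0 : List (List Int)) (x : List Int) (rest : List (List Int)) :
    (d0 ++ x :: rest).getD d0.length [] = x := by
  induction d0 with
  | nil => rfl
  | cons h tl ih => simpa using ih

lemma cws_range3 : PySem.List.pyRange 0 3 1 = [0, 1, 2] := by decide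

-- one iteration of A's middle/inner loops on a well-shaped table
lemma cws_innerA (d0 : List (List Int)) (t : Int × Int × Int) (rest : List (List Int))
    (w i : Int) (hi : i = (d0.length : Int) + 1) (hw : w = 0 ∨ w = 1 ∨ w = 2) :
    (PySem.List.pyRange 0 3 1).foldl (fun dp j =>
      if j ≠ w then
        (PySem.List.pyRange 0 3 1).foldl (fun dp k =>
          if k ≠ j then
            dp.set i.toNat ((dp.getD i.toNat []).set j.toNat
              (PySem.Int.mod ((dp.getD i.toNat []).getD j.toNat 0
                + (dp.getD (i - 1).toNat []).getD k.toNat 0) 1000000007))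
          else dp) dp
      else dp) (d0 ++ cwsTri t :: [0, 0, 0] :: rest)
    = d0 ++ cwsTri t :: cwsTri (cwsStepT t w) :: rest := by
  obtain ⟨a, b, c⟩ := t
  have h1 : i.toNat = d0.length + 1 := by omega
  have h0 : (i - 1).toNat = d0.length := by omega
  rcases hw with hw | hw | hw <;> subst hw <;>
    simp [cws_range3, h1, h0, cws_getD_at, cwsTri, cwsStepT]

-- A's outer loop builds cwsRows
lemma cws_outerA (cs : List Char) (l : List Char) (d0 : List (List Int)) (t : Int × Int × Int)
    (hFWE : ∀ ch ∈ l, ch = 'F' ∨ ch = 'W' ∨ ch = 'E')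
    (hlen : cs.length = d0.length + 1 + l.length)
    (hdrop : cs.drop (d0.length + 1) = l)
    (i0 : Int) (hi0 : i0 = (d0.length : Int) + 1) :
    (PySem.List.pyRange i0 (cs.length : Int) 1).foldl (fun dp i =>
      (PySem.List.pyRange 0 3 1).foldl (fun dp j =>
        if j ≠ cwsWinA ((PySem.List.pyGet? cs i).getD ' ') then
          (PySem.List.pyRange 0 3 1).foldl (fun dp k =>
            if k ≠ j then
              dp.set i.toNat ((dp.getD i.toNat []).set j.toNat
                (PySem.Int.mod ((dp.getD i.toNat []).getD j.toNat 0
                  + (dp.getD (i - 1).toNat []).getD k.toNat 0) 1000000007))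
            else dp) dp
        else dp) dp) (d0 ++ cwsTri t :: List.replicate l.length [0, 0, 0])
    = cwsRows d0 t l := by
  subst hi0
  induction l generalizing d0 t with
  | nil =>
    have hl : cs.length = d0.length + 1 := by simpa using hlen
    have h0 : ((cs.length : Int) - ((d0.length : Int) + 1)).toNat = 0 := by omega
    have hr : PySem.List.pyRange ((d0.length : Int) + 1) (cs.length : Int) 1 = [] := by
      rw [PySem.List.pyRange_one]; simp [h0]
    rw [hr]; simp [cwsRows]
  | cons ch l' ih =>
    have hl : cs.length = d0.length + 1 + (l'.length + 1) := by simpa using hlen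
    have hlt : ((d0.length : Int) + 1) < (cs.length : Int) := by
      rw [hl]; push_cast; omega
    rw [PySem.List.pyRange_one_cons hlt]
    have hget : PySem.List.pyGet? cs ((d0.length : Int) + 1) = some ch := by
      have h1 : (d0.length + 1 : Int) = ((d0.length + 1 : Nat) : Int) := by push_cast; ring
      rw [h1, PySem.List.pyGet?_natCast]
      have : cs[d0.length + 1]? = (cs.drop (d0.length + 1))[0]? := by
        simp [List.getElem?_drop]
      rw [this, hdrop]; rfl
    have hch := hFWE ch (by simp)
    have hw : cwsWinA ((PySem.List.pyGet? cs ((d0.length : Int) + 1)).getD ' ') = 0 ∨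
        cwsWinA ((PySem.List.pyGet? cs ((d0.length : Int) + 1)).getD ' ') = 1 ∨
        cwsWinA ((PySem.List.pyGet? cs ((d0.length : Int) + 1)).getD ' ') = 2 := by
      rw [hget]
      rcases hch with h | h | h <;> subst h <;> simp [cwsWinA]
    simp only [List.foldl_cons, List.length_cons, List.replicate_succ]
    rw [cws_innerA d0 t (List.replicate l'.length [0, 0, 0]) _ _ rfl hw]
    have step :
        d0 ++ cwsTri t :: cwsTri (cwsStepT t (cwsWinA ((PySem.List.pyGet? cs ((d0.length : Int) + 1)).getD ' '))) :: List.replicate l'.length [0, 0, 0]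
        = (d0 ++ [cwsTri t]) ++ cwsTri (cwsStepT t (cwsWinA ch)) :: List.replicate l'.length [0, 0, 0] := by
      rw [hget]; simp
    rw [step]
    have ihlen : cs.length = (d0 ++ [cwsTri t]).length + 1 + l'.length := by
      simp [hlen]; omega
    have ihdrop : cs.drop ((d0 ++ [cwsTri t]).length + 1) = l' := by
      have : (d0 ++ [cwsTri t]).length + 1 = (d0.length + 1) + 1 := by simp
      rw [this, ← List.drop_drop, hdrop]; rfl
    have hcast : (d0.length : Int) + 1 + 1 = (((d0 ++ [cwsTri t]).length : Int) + 1) := by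
      simp
    rw [hcast, ih (d0 ++ [cwsTri t]) (cwsStepT t (cwsWinA ch)) (fun x hx => hFWE x (by simp [hx])) ihlen ihdrop]
    rfl

lemma cws_rows_last (d0 : List (List Int)) (t : Int × Int × Int) (l : List Char) :
    (cwsRows d0 t l).getD (d0.length + l.length) [] = cwsTri (cwsRun t l) := by
  induction l generalizing d0 t with
  | nil => simp [cwsRows, cwsRun]
  | cons ch l' ih =>
    show (cwsRows (d0 ++ [cwsTri t]) (cwsStepT t (cwsWinA ch)) l').getD _ [] = _
    have h2 := ih (d0 ++ [cwsTri t]) (cwsStepT t (cwsWinA ch))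
    have e : d0.length + (ch :: l').length = (d0 ++ [cwsTri t]).length + l'.length := by
      simp only [List.length_cons, List.length_append, List.length_nil]
      omega
    rw [e, h2]
    rfl

-- A's init loop on the first row
lemma cws_initA (w0 : Int) (rest : List (List Int)) (hw : w0 = 0 ∨ w0 = 1 ∨ w0 = 2) :
    (PySem.List.pyRange 0 3 1).foldl (fun dp j =>
      if j ≠ w0 then dp.set 0 ((dp.getD 0 []).set j.toNat 1) else dp)
      ([0, 0, 0] :: rest)
    = cwsTri (if (0:Int) = w0 then 0 else 1, if (1:Int) = w0 then 0 else 1,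
        if (2:Int) = w0 then 0 else 1) :: rest := by
  rcases hw with hw | hw | hw <;> subst hw <;> simp [cws_range3, cwsTri]

-- ===== pure (mod-free) model shared by both ports =====

def cwsPStep (t : Int × Int × Int) (w : Int) : Int × Int × Int :=
  (if (0 : Int) = w then 0 else t.2.1 + t.2.2,
   if (1 : Int) = w then 0 else t.1 + t.2.2,
   if (2 : Int) = w then 0 else t.1 + t.2.1)

def cwsPRun (t : Int × Int × Int) (l : List Char) : Int × Int × Int :=
  l.foldl (fun t ch => cwsPStep t (cwsWinA ch)) t

def cwsPSum (t : Int × Int × Int) : Int := t.1 + t.2.1 + t.2.2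

-- componentwise congruence mod 10^9+7
def cwsTEq (u v : Int × Int × Int) : Prop :=
  u.1 ≡ v.1 [ZMOD 1000000007] ∧ u.2.1 ≡ v.2.1 [ZMOD 1000000007] ∧ u.2.2 ≡ v.2.2 [ZMOD 1000000007]

lemma cws_mod_modeq (a : Int) : PySem.Int.mod a 1000000007 ≡ a [ZMOD 1000000007] := by
  rw [PySem.Int.mod_eq_emod_of_pos (by norm_num)]
  exact Int.emod_emod_of_dvd a dvd_rfl

lemma cws_stepT_modeq (t t' : Int × Int × Int) (w : Int) (h : cwsTEq t t') :
    cwsTEq (cwsStepT t w) (cwsPStep t' w) := by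
  obtain ⟨h1, h2, h3⟩ := h
  refine ⟨?_, ?_, ?_⟩ <;> simp only [cwsStepT, cwsPStep] <;> split_ifs <;> try rfl
  · refine (cws_mod_modeq _).trans ?_
    have hb := (cws_mod_modeq (0 + t.2.1)).trans ((Int.ModEq.refl 0).add h2)
    simpa using hb.add h3
  · refine (cws_mod_modeq _).trans ?_
    have hb := (cws_mod_modeq (0 + t.1)).trans ((Int.ModEq.refl 0).add h1)
    simpa using hb.add h3
  · refine (cws_mod_modeq _).trans ?_
    have hb := (cws_mod_modeq (0 + t.1)).trans ((Int.ModEq.refl 0).add h1)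
    simpa using hb.add h2

lemma cws_run_modeq (l : List Char) (t t' : Int × Int × Int) (h : cwsTEq t t') :
    cwsTEq (cwsRun t l) (cwsPRun t' l) := by
  induction l generalizing t t' with
  | nil => exact h
  | cons ch l' ih => exact ih _ _ (cws_stepT_modeq _ _ _ h)

-- ===== pure 3×3 matrices =====

def cwsM3 := (Int × Int × Int) × (Int × Int × Int) × (Int × Int × Int)

def cwsMId : cwsM3 := ((1, 0, 0), (0, 1, 0), (0, 0, 1))

def cwsPureM (w : Int) : cwsM3 :=
  ((if (0:Int) = w ∨ (0:Int) = 0 then 0 else 1, if (1:Int) = w ∨ (1:Int) = 0 then 0 else 1,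
    if (2:Int) = w ∨ (2:Int) = 0 then 0 else 1),
   (if (0:Int) = w ∨ (0:Int) = 1 then 0 else 1, if (1:Int) = w ∨ (1:Int) = 1 then 0 else 1,
    if (2:Int) = w ∨ (2:Int) = 1 then 0 else 1),
   (if (0:Int) = w ∨ (0:Int) = 2 then 0 else 1, if (1:Int) = w ∨ (1:Int) = 2 then 0 else 1,
    if (2:Int) = w ∨ (2:Int) = 2 then 0 else 1))

def cwsMMul (A B : cwsM3) : cwsM3 :=
  ((0 + A.1.1 * B.1.1 + A.1.2.1 * B.2.1.1 + A.1.2.2 * B.2.2.1,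
    0 + A.1.1 * B.1.2.1 + A.1.2.1 * B.2.1.2.1 + A.1.2.2 * B.2.2.2.1,
    0 + A.1.1 * B.1.2.2 + A.1.2.1 * B.2.1.2.2 + A.1.2.2 * B.2.2.2.2),
   (0 + A.2.1.1 * B.1.1 + A.2.1.2.1 * B.2.1.1 + A.2.1.2.2 * B.2.2.1,
    0 + A.2.1.1 * B.1.2.1 + A.2.1.2.1 * B.2.1.2.1 + A.2.1.2.2 * B.2.2.2.1,
    0 + A.2.1.1 * B.1.2.2 + A.2.1.2.1 * B.2.1.2.2 + A.2.1.2.2 * B.2.2.2.2),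
   (0 + A.2.2.1 * B.1.1 + A.2.2.2.1 * B.2.1.1 + A.2.2.2.2 * B.2.2.1,
    0 + A.2.2.1 * B.1.2.1 + A.2.2.2.1 * B.2.1.2.1 + A.2.2.2.2 * B.2.2.2.1,
    0 + A.2.2.1 * B.1.2.2 + A.2.2.2.1 * B.2.1.2.2 + A.2.2.2.2 * B.2.2.2.2))

def cwsVMul (v : Int × Int × Int) (A : cwsM3) : Int × Int × Int :=
  (v.1 * A.1.1 + v.2.1 * A.2.1.1 + v.2.2 * A.2.2.1,
   v.1 * A.1.2.1 + v.2.1 * A.2.1.2.1 + v.2.2 * A.2.2.2.1,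
   v.1 * A.1.2.2 + v.2.1 * A.2.1.2.2 + v.2.2 * A.2.2.2.2)

def cwsPProd (Q : cwsM3) (l : List Char) : cwsM3 :=
  l.foldl (fun Q ch => cwsMMul Q (cwsPureM (cwsWinA ch))) Q

lemma cws_vmul_mId (v : Int × Int × Int) : cwsVMul v cwsMId = v := by
  obtain ⟨a, b, c⟩ := v
  simp [cwsVMul, cwsMId]

lemma cws_vmul_mmul (v : Int × Int × Int) (A B : cwsM3) :
    cwsVMul v (cwsMMul A B) = cwsVMul (cwsVMul v A) B := by
  obtain ⟨a, b, c⟩ := v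
  obtain ⟨⟨a11, a12, a13⟩, ⟨a21, a22, a23⟩, ⟨a31, a32, a33⟩⟩ := A
  obtain ⟨⟨b11, b12, b13⟩, ⟨b21, b22, b23⟩, ⟨b31, b32, b33⟩⟩ := B
  simp only [cwsVMul, cwsMMul, Prod.mk.injEq]
  refine ⟨by ring, by ring, by ring⟩

lemma cws_pstep_eq_vmul (t : Int × Int × Int) (w : Int) :
    cwsPStep t w = cwsVMul t (cwsPureM w) := by
  obtain ⟨a, b, c⟩ := t
  simp only [cwsPStep, cwsVMul, cwsPureM, Prod.mk.injEq]
  simp only [mul_ite, mul_zero, mul_one]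
  refine ⟨?_, ?_, ?_⟩ <;> split_ifs <;> first | omega | tauto

lemma cws_vmul_fold (l : List Char) (Q : cwsM3) (t : Int × Int × Int) :
    cwsVMul t (cwsPProd Q l) = cwsPRun (cwsVMul t Q) l := by
  induction l generalizing Q with
  | nil => rfl
  | cons ch l' ih =>
    show cwsVMul t (cwsPProd (cwsMMul Q (cwsPureM (cwsWinA ch))) l') = _
    rw [ih, cws_vmul_mmul, ← cws_pstep_eq_vmul]
    rfl

-- ===== B's fold is congruent to the pure matrix product =====

def cwsRowEq (r : List Int) (t : Int × Int × Int) : Prop :=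
  ∃ x y z, r = [x, y, z] ∧ x ≡ t.1 [ZMOD 1000000007] ∧ y ≡ t.2.1 [ZMOD 1000000007] ∧
    z ≡ t.2.2 [ZMOD 1000000007]

def cwsMEq (P : List (List Int)) (Q : cwsM3) : Prop :=
  ∃ r0 r1 r2, P = [r0, r1, r2] ∧ cwsRowEq r0 Q.1 ∧ cwsRowEq r1 Q.2.1 ∧ cwsRowEq r2 Q.2.2

lemma cws_emod_modeq (a : Int) : a % 1000000007 ≡ a [ZMOD 1000000007] :=
  Int.emod_emod_of_dvd a dvd_rfl

lemma cws_matstep_meq (P : List (List Int)) (Q : cwsM3) (ch : Char) (h : cwsMEq P Q) :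
    cwsMEq (cwsMatStep P ch) (cwsMMul Q (cwsPureM (cwsWinA ch))) := by
  obtain ⟨r0, r1, r2, hP, ⟨x0, y0, z0, h0, hx0, hy0, hz0⟩,
    ⟨x1, y1, z1, h1, hx1, hy1, hz1⟩, ⟨x2, y2, z2, h2, hx2, hy2, hz2⟩⟩ := h
  obtain ⟨⟨q11, q12, q13⟩, ⟨q21, q22, q23⟩, ⟨q31, q32, q33⟩⟩ := Q
  subst hP h0 h1 h2
  simp only at hx0 hy0 hz0 hx1 hy1 hz1 hx2 hy2 hz2
  have hw : cwsWinA ch = cwsWinB ch := rfl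
  have hw4 : cwsWinB ch = 0 ∨ cwsWinB ch = 1 ∨ cwsWinB ch = 2 ∨ cwsWinB ch = -1 := by
    unfold cwsWinB; split_ifs <;> simp
  rw [hw]
  simp only [cwsMEq, cwsRowEq]
  rcases hw4 with h | h | h | h <;>
    · simp [cwsMatStep, cwsMMul, cwsPureM, cws_range3, h]
      and_intros <;>
        first
          | exact Int.ModEq.refl _
          | exact (cws_emod_modeq _).trans (hx0.add hy0)
          | exact (cws_emod_modeq _).trans (hx0.add hz0)
          | exact (cws_emod_modeq _).trans (hy0.add hz0)
          | exact (cws_emod_modeq _).trans (hx1.add hy1)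
          | exact (cws_emod_modeq _).trans (hx1.add hz1)
          | exact (cws_emod_modeq _).trans (hy1.add hz1)
          | exact (cws_emod_modeq _).trans (hx2.add hy2)
          | exact (cws_emod_modeq _).trans (hx2.add hz2)
          | exact (cws_emod_modeq _).trans (hy2.add hz2)

lemma cws_fold_meq (l : List Char) (P : List (List Int)) (Q : cwsM3) (h : cwsMEq P Q) :
    cwsMEq (l.foldl cwsMatStep P) (cwsPProd Q l) := by
  induction l generalizing P Q with
  | nil => exact h
  | cons ch l' ih => exact ih _ _ (cws_matstep_meq _ _ _ h)

-- ===== VERDICT (by name: the statement is the Claim_ definition above) =====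
lemma cws_sumA_eq (u v : Int × Int × Int) (h : cwsTEq u v) :
    PySem.Int.mod ((cwsTri u).foldl (· + ·) 0) 1000000007 = cwsPSum v % 1000000007 := by
  obtain ⟨a, b, c⟩ := u
  have hs : (cwsTri (a, b, c)).foldl (· + ·) 0 = a + b + c := by simp [cwsTri]
  rw [PySem.Int.mod_eq_emod_of_pos (by norm_num), hs]
  exact (h.1.add h.2.1).add h.2.2

theorem count_winning_sequences_spec : Claim_equal_count_winning_sequences := by
  intro s _hdom hpre
  unfold Spec_count_winning_sequences
  obtain ⟨hne, hcase⟩ := hpre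
  by_cases h1 : (s.toList.length : Int) = 1
  · simp only [count_winning_sequences, count_winning_sequences_alt, if_pos h1]
  · have hFWE : ∀ c ∈ s.toList, c = 'F' ∨ c = 'W' ∨ c = 'E' := by
      rcases hcase with h | h
      · exact absurd (by exact_mod_cast h) h1
      · intro c hc
        have := List.all_eq_true.mp h c hc
        simp only [Bool.or_eq_true, beq_iff_eq] at this
        tauto
    obtain ⟨c0, rest, hcs⟩ : ∃ c0 rest, s.toList = c0 :: rest := by
      cases hh : s.toList with
      | nil => exact absurd hh hne
      | cons x xs => exact ⟨x, xs, rfl⟩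
    have hget0 : PySem.List.pyGet? s.toList 0 = some c0 := by
      rw [hcs]; exact PySem.List.pyGet?_zero_cons _ _
    have hw0 : cwsWinA c0 = 0 ∨ cwsWinA c0 = 1 ∨ cwsWinA c0 = 2 := by
      rcases hFWE c0 (by rw [hcs]; simp) with h | h | h <;> subst h <;> simp [cwsWinA]
    set w0 := cwsWinA c0 with hw0def
    set t0 : Int × Int × Int := (if (0:Int) = w0 then 0 else 1, if (1:Int) = w0 then 0 else 1,
      if (2:Int) = w0 then 0 else 1) with ht0
    have hrepl : List.replicate s.toList.length ([0,0,0] : List Int)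
        = [0,0,0] :: List.replicate rest.length [0,0,0] := by
      rw [hcs]; rfl
    have hdrop1 : s.toList.drop 1 = rest := by rw [hcs]; rfl
    have hlen : s.toList.length = ([] : List (List Int)).length + 1 + rest.length := by
      rw [hcs]; simp; omega
    -- evaluate A to the rolling mod-triple, then to the pure value
    have hA : count_winning_sequences s
        = PySem.Int.mod ((cwsTri (cwsRun t0 rest)).foldl (· + ·) 0) 1000000007 := by
      simp only [count_winning_sequences, if_neg h1]
      rw [hget0, hrepl]
      rw [show (Option.some c0).getD ' ' = c0 from rfl]
      rw [cws_initA w0 _ hw0]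
      rw [← ht0]
      rw [show cwsTri t0 :: List.replicate rest.length ([0,0,0] : List Int)
        = [] ++ cwsTri t0 :: List.replicate rest.length [0,0,0] from rfl]
      rw [cws_outerA s.toList rest [] t0 (fun x hx => hFWE x (by rw [hcs]; simp [hx])) hlen (by simpa using hdrop1) 1 (by simp)]
      have hidx : ((s.toList.length : Int) - 1).toNat = ([] : List (List Int)).length + rest.length := by
        rw [hcs]; simp
      rw [hidx, cws_rows_last]
    have hAr : count_winning_sequences s = cwsPSum (cwsPRun t0 rest) % 1000000007 := by
      rw [hA]
      exact cws_sumA_eq _ _ (cws_run_modeq rest t0 t0 ⟨Int.ModEq.refl _, Int.ModEq.refl _, Int.ModEq.refl _⟩)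
    rw [hAr]
    -- evaluate B: the folded matrix is congruent to the pure matrix product
    have hP0 : ((PySem.List.pyRange 0 3 1).map (fun i =>
        (PySem.List.pyRange 0 3 1).map (fun j => if i = j then (1:Int) else 0)))
        = [[1,0,0],[0,1,0],[0,0,1]] := by decide
    have hMEq0 : cwsMEq [[1,0,0],[0,1,0],[0,0,1]] cwsMId :=
      ⟨_, _, _, rfl, ⟨1, 0, 0, rfl, Int.ModEq.refl _, Int.ModEq.refl _, Int.ModEq.refl _⟩,
        ⟨0, 1, 0, rfl, Int.ModEq.refl _, Int.ModEq.refl _, Int.ModEq.refl _⟩,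
        ⟨0, 0, 1, rfl, Int.ModEq.refl _, Int.ModEq.refl _, Int.ModEq.refl _⟩⟩
    have hpure : cwsPRun t0 rest = cwsVMul t0 (cwsPProd cwsMId rest) := by
      rw [cws_vmul_fold, cws_vmul_mId]
    have hMEq := cws_fold_meq rest _ _ hMEq0
    rcases hQ : cwsPProd cwsMId rest with ⟨⟨q11, q12, q13⟩, ⟨q21, q22, q23⟩, ⟨q31, q32, q33⟩⟩
    rw [hQ] at hMEq
    obtain ⟨r0, r1, r2, hP, ⟨x0, y0, z0, h0, hx0, hy0, hz0⟩,
      ⟨x1, y1, z1, hr1, hx1, hy1, hz1⟩, ⟨x2, y2, z2, hr2, hx2, hy2, hz2⟩⟩ := hMEq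
    subst h0 hr1 hr2
    simp only at hx0 hy0 hz0 hx1 hy1 hz1 hx2 hy2 hz2
    simp only [count_winning_sequences_alt, if_neg h1]
    rw [hget0, hdrop1]
    rw [show (Option.some c0).getD ' ' = c0 from rfl]
    rw [show cwsWinB c0 = w0 from rfl]
    rw [hP0, hP, hpure, hQ]
    rcases hw0 with hw | hw | hw
    · rw [hw]
      simp [cws_range3, PySem.Int.mod_eq_emod_of_pos, ht0, hw]
      have e : cwsPSum (cwsVMul ((0:Int), (1:Int), (1:Int))
          ((q11, q12, q13), (q21, q22, q23), (q31, q32, q33)))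
          = 0 + q21 + q22 + q23 + q31 + q32 + q33 := by
        simp [cwsPSum, cwsVMul]; ring
      rw [e, show x1 + y1 + z1 + x2 + y2 + z2 = 0 + x1 + y1 + z1 + x2 + y2 + z2 from by ring]
      show (0 + q21 + q22 + q23 + q31 + q32 + q33 : Int) ≡ 0 + x1 + y1 + z1 + x2 + y2 + z2 [ZMOD 1000000007]
      have hchain := (Int.ModEq.refl (0:Int)).add hx1 |>.add hy1 |>.add hz1 |>.add hx2 |>.add hy2 |>.add hz2
      exact hchain.symm
    · rw [hw]
      simp [cws_range3, PySem.Int.mod_eq_emod_of_pos, ht0, hw]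
      have e : cwsPSum (cwsVMul ((1:Int), (0:Int), (1:Int))
          ((q11, q12, q13), (q21, q22, q23), (q31, q32, q33)))
          = 0 + q11 + q12 + q13 + q31 + q32 + q33 := by
        simp [cwsPSum, cwsVMul]; ring
      rw [e, show x0 + y0 + z0 + x2 + y2 + z2 = 0 + x0 + y0 + z0 + x2 + y2 + z2 from by ring]
      show (0 + q11 + q12 + q13 + q31 + q32 + q33 : Int) ≡ 0 + x0 + y0 + z0 + x2 + y2 + z2 [ZMOD 1000000007]
      have hchain := (Int.ModEq.refl (0:Int)).add hx0 |>.add hy0 |>.add hz0 |>.add hx2 |>.add hy2 |>.add hz2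
      exact hchain.symm
    · rw [hw]
      simp [cws_range3, PySem.Int.mod_eq_emod_of_pos, ht0, hw]
      have e : cwsPSum (cwsVMul ((1:Int), (1:Int), (0:Int))
          ((q11, q12, q13), (q21, q22, q23), (q31, q32, q33)))
          = 0 + q11 + q12 + q13 + q21 + q22 + q23 := by
        simp [cwsPSum, cwsVMul]; ring
      rw [e, show x0 + y0 + z0 + x1 + y1 + z1 = 0 + x0 + y0 + z0 + x1 + y1 + z1 from by ring]
      show (0 + q11 + q12 + q13 + q21 + q22 + q23 : Int) ≡ 0 + x0 + y0 + z0 + x1 + y1 + z1 [ZMOD 1000000007]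
      have hchain := (Int.ModEq.refl (0:Int)).add hx0 |>.add hy0 |>.add hz0 |>.add hx1 |>.add hy1 |>.add hz1
      exact hchain.symm
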